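-- pv_equiv track=rewrite | github.com/jackseg80/scalp-radar | backend/regime/detectors.py | apply_hysteresis
-- ===== SOURCE A (Python) =====
-- SEVERITY = {"bull": 0, "range": 1, "bear": 2, "crash": 3}
--
-- def apply_hysteresis(
--     raw_labels: list[str],
--     h_down: int,
--     h_up: int,
-- ) -> list[str]:
--     """Hysteresis asymétrique sur les labels.
--
--     h_down : candles pour transition vers état PLUS sévère
--     h_up   : candles pour transition vers état MOINS sévère
--     Sévérité : bull(0) < range(1) < bear(2) < crash(3)
--     """
--     if not raw_labels:
--         return []
--
--     result = [raw_labels[0]]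
--     current = raw_labels[0]
--     counter = 0
--     pending = None
--
--     for i in range(1, len(raw_labels)):
--         new = raw_labels[i]
--         if new != current:
--             if pending == new:
--                 counter += 1
--             else:
--                 pending = new
--                 counter = 1
--
--             new_sev = SEVERITY.get(new, 1)
--             cur_sev = SEVERITY.get(current, 1)
--             threshold = h_down if new_sev > cur_sev else h_up
--
--             if counter >= threshold:
--                 current = new
--                 counter = 0
--                 pending = None
--         else:
--             counter = 0
--             pending = None
--
--         result.append(current)
--
--     return result
-- ===== SOURCE B (Python) =====
-- SEVERITY = {"bull": 0, "range": 1, "bear": 2, "crash": 3}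
--
--
-- def apply_hysteresis(raw_labels, h_down, h_up):
--     """Run-length decomposition: compress the tail into maximal runs, then
--     resolve each run against the current regime in one arithmetic step."""
--     if not raw_labels:
--         return []
--     # one pass: compress raw_labels[1:] into maximal (value, length) runs
--     runs = []
--     run_val, run_len = None, 0
--     for lab in raw_labels[1:]:
--         if run_len and lab == run_val:
--             run_len += 1
--         else:
--             if run_len:
--                 runs.append((run_val, run_len))
--             run_val, run_len = lab, 1
--     if run_len:
--         runs.append((run_val, run_len))
--
--     out = [raw_labels[0]]
--     current = raw_labels[0]
--     for v, n in runs: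
--         if v == current:
--             out.extend([current] * n)
--         else:
--             t = h_down if SEVERITY.get(v, 1) > SEVERITY.get(current, 1) else h_up
--             pre = min(n, max(t - 1, 0))
--             out.extend([current] * pre)
--             out.extend([v] * (n - pre))
--             if n - pre > 0:
--                 current = v
--     return out
-- ===== Notes on version B (the rewrite author's own statement) =====
-- stated objective: alternative
-- what changed: B replaces A's per-index counter/pending state machine by a two-phase run-length decomposition: it first compresses the tail into maximal (value, length) runs, then resolves each whole run against the current regime with one min/max arithmetic step instead of counting candle by candle.
import Mathlib
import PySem

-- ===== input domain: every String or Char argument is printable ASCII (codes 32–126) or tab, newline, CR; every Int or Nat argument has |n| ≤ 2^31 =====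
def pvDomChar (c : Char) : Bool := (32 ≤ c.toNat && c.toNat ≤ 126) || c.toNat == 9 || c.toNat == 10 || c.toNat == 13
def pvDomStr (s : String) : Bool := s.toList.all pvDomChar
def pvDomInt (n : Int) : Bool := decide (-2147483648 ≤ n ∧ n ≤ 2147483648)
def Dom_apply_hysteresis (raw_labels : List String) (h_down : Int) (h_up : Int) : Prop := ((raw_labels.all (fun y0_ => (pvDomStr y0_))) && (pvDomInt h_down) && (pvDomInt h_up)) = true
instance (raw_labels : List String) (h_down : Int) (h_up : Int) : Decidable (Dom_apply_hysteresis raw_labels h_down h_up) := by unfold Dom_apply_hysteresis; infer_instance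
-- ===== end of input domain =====

-- B replaces A's per-index counter/pending state machine by a run-length decomposition:
-- compress the tail into maximal runs, then resolve each run against the current regime
-- in one arithmetic step (objective: alternative decomposition, same cost).

-- ===== PORT A =====
def SEVERITY : PySem.Dict String Int :=
  PySem.Dict.ofList [("bull", 0), ("range", 1), ("bear", 2), ("crash", 3)]

-- one iteration of A's for-loop body (on the label raw_labels[i])
def stepA (h_down h_up : Int) (st : List String × String × Int × Option String)
    (new : String) : List String × String × Int × Option String :=
  let result := st.1
  let current := st.2.1
  let counter := st.2.2.1
  let pending := st.2.2.2
  if new ≠ current then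
    let counter := if pending = some new then counter + 1 else 1
    let pending := if pending = some new then pending else some new
    let new_sev := SEVERITY.getD new 1
    let cur_sev := SEVERITY.getD current 1
    let threshold := if new_sev > cur_sev then h_down else h_up
    if counter ≥ threshold then (result ++ [new], new, 0, none)
    else (result ++ [current], current, counter, pending)
  else (result ++ [current], current, 0, none)

def apply_hysteresis (raw_labels : List String) (h_down : Int) (h_up : Int) : List String :=
  match raw_labels with
  | [] => []
  | x0 :: _ =>
    ((PySem.List.pyRange 1 (raw_labels.length : Int) 1).foldl
      (fun st i => stepA h_down h_up st (PySem.List.pyGetD raw_labels i ""))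
      ([x0], x0, 0, none)).1

-- ===== PORT B =====
-- run_val = None is represented by run_len = 0 (the guard Source B itself uses)
def rleStep (st : List (String × Int) × String × Int) (lab : String) :
    List (String × Int) × String × Int :=
  let runs := st.1
  let run_val := st.2.1
  let run_len := st.2.2
  if run_len ≠ 0 ∧ lab = run_val then (runs, run_val, run_len + 1)
  else ((if run_len ≠ 0 then runs ++ [(run_val, run_len)] else runs), lab, 1)

-- the final 'if run_len: runs.append(...)' flush
def flushed (r : List (String × Int) × String × Int) : List (String × Int) :=
  if r.2.2 ≠ 0 then r.1 ++ [(r.2.1, r.2.2)] else r.1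

-- one iteration of Source B's loop over the runs
def procStep (h_down h_up : Int) (st : List String × String) (r : String × Int) :
    List String × String :=
  let out := st.1
  let current := st.2
  let v := r.1
  let n := r.2
  if v = current then (out ++ List.replicate n.toNat current, current)
  else
    let t := if SEVERITY.getD v 1 > SEVERITY.getD current 1 then h_down else h_up
    let pre := min n (max (t - 1) 0)
    let out := out ++ List.replicate pre.toNat current ++ List.replicate (n - pre).toNat v
    if n - pre > 0 then (out, v) else (out, current)

def apply_hysteresis_alt (raw_labels : List String) (h_down : Int) (h_up : Int) : List String :=
  match raw_labels with
  | [] => []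
  | x0 :: rest =>
    let runs := flushed (rest.foldl rleStep ([], "", 0))
    (runs.foldl (procStep h_down h_up) ([x0], x0)).1

-- ===== PRECONDITION & SPEC =====
def Spec_apply_hysteresis (raw_labels : List String) (h_down : Int) (h_up : Int) (out : List String) : Prop := out = apply_hysteresis_alt raw_labels h_down h_up
instance (raw_labels : List String) (h_down : Int) (h_up : Int) (out : List String) : Decidable (Spec_apply_hysteresis raw_labels h_down h_up out) := by unfold Spec_apply_hysteresis; infer_instance

-- ===== CLAIM (what is proved, stated in full; the proofs are below) =====
def Claim_equal_apply_hysteresis : Prop := ∀ (raw_labels : List String) (h_down : Int) (h_up : Int), Dom_apply_hysteresis raw_labels h_down h_up → Spec_apply_hysteresis raw_labels h_down h_up (apply_hysteresis raw_labels h_down h_up)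

-- ===== LEMMAS AND PROOFS =====

-- the threshold A picks for a transition current → v
def thr (hd hu : Int) (cur v : String) : Int :=
  if SEVERITY.getD v 1 > SEVERITY.getD cur 1 then hd else hu

-- A's loop, written as the list of labels it emits from a given state
def loopA (hd hu : Int) : List String → String → Int → Option String → List String
  | [], _, _, _ => []
  | y :: ys, cur, c, p =>
    if y ≠ cur then
      let c' := if p = some y then c + 1 else (1 : Int)
      if c' ≥ thr hd hu cur y then y :: loopA hd hu ys y 0 none
      else cur :: loopA hd hu ys cur c' (some y)
    else cur :: loopA hd hu ys cur 0 none

-- B's run processing, written recursively (the labels it emits)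
def procB (hd hu : Int) : List (String × Int) → String → List String
  | [], _ => []
  | (v, n) :: rs, cur =>
    if v = cur then List.replicate n.toNat cur ++ procB hd hu rs cur
    else
      let pre := min n (max (thr hd hu cur v - 1) 0)
      List.replicate pre.toNat cur ++ List.replicate (n - pre).toNat v ++
        (if n - pre > 0 then procB hd hu rs v else procB hd hu rs cur)

-- Source B's whole RLE phase on a list (empty start state)
def rleTop : List String → List (String × Int)
  | [] => []
  | z :: zs => flushed (zs.foldl rleStep ([], z, 1))

lemma foldA_eq (hd hu : Int) :
    ∀ (ys : List String) (res : List String) (cur : String) (c : Int) (p : Option String),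
      (ys.foldl (stepA hd hu) (res, cur, c, p)).1 = res ++ loopA hd hu ys cur c p := by
  intro ys
  induction ys with
  | nil => intro res cur c p; simp [loopA]
  | cons y ys ih =>
    intro res cur c p
    by_cases hyc : y = cur
    · simp [stepA, loopA, hyc, ih]
    · have hpend : (if p = some y then p else some y) = some y := by
        by_cases h : p = some y <;> simp [h]
      simp [stepA, loopA, hyc, thr, hpend]
      split_ifs <;> simp [ih]

lemma foldProc_eq (hd hu : Int) :
    ∀ (rs : List (String × Int)) (out : List String) (cur : String),
      (rs.foldl (procStep hd hu) (out, cur)).1 = out ++ procB hd hu rs cur := by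
  intro rs
  induction rs with
  | nil => intro out cur; simp [procB]
  | cons r rs ih =>
    intro out cur
    obtain ⟨v, n⟩ := r
    by_cases hv : v = cur
    · simp [procStep, procB, hv, ih]
    · simp [procStep, procB, hv, thr]
      split_ifs <;> simp [ih]

-- at counter 0 (or when the head does not continue the pending run) the pending state is irrelevant
lemma loopA_forget (hd hu : Int) :
    ∀ (ys : List String) (cur : String) (c : Int) (p : Option String),
      (∀ y, ys.head? = some y → p = some y → c = 0) →
      loopA hd hu ys cur c p = loopA hd hu ys cur 0 none := by
  intro ys cur c p h
  cases ys with
  | nil => rfl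
  | cons y ys =>
    by_cases hyc : y = cur
    · simp [loopA, hyc]
    · have hc' : (if p = some y then c + 1 else (1 : Int)) = 1 := by
        by_cases hp : p = some y
        · have := h y (by simp) hp; simp [hp, this]
        · simp [hp]
      simp only [loopA, hc']
      simp

-- a run of the current label is emitted verbatim and resets the state
lemma loopA_same (hd hu : Int) :
    ∀ (k : Nat) (ys : List String) (v : String),
      loopA hd hu (List.replicate k v ++ ys) v 0 none =
        List.replicate k v ++ loopA hd hu ys v 0 none := by
  intro k
  induction k with
  | zero => intro ys v; rw [List.replicate_zero, List.nil_append, List.nil_append]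
  | succ k ih => intro ys v; simp only [List.replicate_succ, List.cons_append, loopA]; simp [ih]

-- a foreign run: min (T) labels of `cur` are emitted, then the flip
lemma loopA_diff (hd hu : Int) :
    ∀ (k : Nat) (c : Int) (ys : List String) (cur v : String),
      v ≠ cur → ys.head? ≠ some v →
      loopA hd hu (List.replicate k v ++ ys) cur c (some v) =
        List.replicate (min k (thr hd hu cur v - 1 - c).toNat) cur ++
        List.replicate (k - min k (thr hd hu cur v - 1 - c).toNat) v ++
        (if (thr hd hu cur v - 1 - c).toNat < k then loopA hd hu ys v 0 none
         else loopA hd hu ys cur 0 none) := by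
  intro k
  induction k with
  | zero =>
    intro c ys cur v hvc hhd
    have hforget := loopA_forget hd hu ys cur c (some v) (by
      intro y hy hp
      exfalso; apply hhd; rw [hy]; injection hp with h; rw [h])
    simpa using hforget
  | succ k ih =>
    intro c ys cur v hvc hhd
    have hstep : loopA hd hu (List.replicate (k+1) v ++ ys) cur c (some v) =
        if c + 1 ≥ thr hd hu cur v then v :: loopA hd hu (List.replicate k v ++ ys) v 0 none
        else cur :: loopA hd hu (List.replicate k v ++ ys) cur (c+1) (some v) := by
      simp [List.replicate_succ, loopA, hvc]
    by_cases hfl : c + 1 ≥ thr hd hu cur v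
    · have hT : (thr hd hu cur v - 1 - c).toNat = 0 := by omega
      rw [hstep, if_pos hfl, loopA_same, hT]
      simp [List.replicate_succ]
    · have hT : 1 ≤ (thr hd hu cur v - 1 - c).toNat := by omega
      have hT' : (thr hd hu cur v - 1 - (c+1)).toNat = (thr hd hu cur v - 1 - c).toNat - 1 := by
        omega
      rw [hstep, if_neg hfl, ih (c+1) ys cur v hvc hhd, hT']
      have h1 : min (k+1) ((thr hd hu cur v - 1 - c).toNat) =
          1 + min k ((thr hd hu cur v - 1 - c).toNat - 1) := by omega
      have h2 : (k+1) - min (k+1) ((thr hd hu cur v - 1 - c).toNat) =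
          k - min k ((thr hd hu cur v - 1 - c).toNat - 1) := by omega
      have h3 : ((thr hd hu cur v - 1 - c).toNat - 1 < k) ↔
          ((thr hd hu cur v - 1 - c).toNat < k + 1) := by omega
      rw [h2, h1]
      simp only [h3]
      simp [List.replicate_add]

-- RLE accumulator lemma: the already-closed runs pass straight through
lemma rle_acc :
    ∀ (xs : List String) (runs : List (String × Int)) (rv : String) (rl : Int), 1 ≤ rl →
      flushed (xs.foldl rleStep (runs, rv, rl)) =
        runs ++ flushed (xs.foldl rleStep ([], rv, rl)) := by
  intro xs
  induction xs with
  | nil => intro runs rv rl hrl; simp [flushed, if_pos (by omega : rl ≠ 0)]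
  | cons x xs ih =>
    intro runs rv rl hrl
    by_cases hx : rl ≠ 0 ∧ x = rv
    · simp only [List.foldl_cons, rleStep, if_pos hx]
      rw [ih runs rv (rl+1) (by omega), ih [] rv (rl+1) (by omega)]
    · simp only [List.foldl_cons, rleStep, if_neg hx, if_pos (by omega : rl ≠ 0)]
      rw [ih (runs ++ [(rv, rl)]) x 1 (by omega), ih ([] ++ [(rv, rl)]) x 1 (by omega)]
      simp

-- RLE of (one maximal run ++ rest) from an open run (rv, rl)
lemma rle_run :
    ∀ (k : Nat) (rl : Int) (rest : List String) (rv : String), 1 ≤ rl →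
      rest.head? ≠ some rv →
      flushed ((List.replicate k rv ++ rest).foldl rleStep ([], rv, rl)) =
        (rv, rl + k) :: rleTop rest := by
  intro k
  induction k with
  | zero =>
    intro rl rest rv hrl hhd
    cases rest with
    | nil => simp [flushed, rleTop, if_pos (by omega : rl ≠ 0)]
    | cons z zs =>
      have hz : z ≠ rv := by intro h; apply hhd; simp [h]
      simp only [List.replicate_zero, List.nil_append, List.foldl_cons, rleStep]
      rw [if_neg (by tauto), if_pos (by omega : rl ≠ 0)]
      rw [rle_acc zs [(rv, rl)] z 1 (by omega)]
      simp [rleTop]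
  | succ k ih =>
    intro rl rest rv hrl hhd
    have hstep : rleStep ([], rv, rl) rv = ([], rv, rl + 1) := by
      simp [rleStep, show rl ≠ 0 by omega]
    rw [List.replicate_succ, List.cons_append, List.foldl_cons, hstep]
    rw [ih (rl+1) rest rv (by omega) hhd]
    have : rl + 1 + (k : Int) = rl + ((k : Nat) + 1 : Nat) := by push_cast; ring
    rw [this]

-- the main correspondence: A's loop = B's run processing
lemma main_eq (hd hu : Int) :
    ∀ (n : Nat) (ys : List String) (cur : String), ys.length ≤ n →
      loopA hd hu ys cur 0 none = procB hd hu (rleTop ys) cur := by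
  intro n
  induction n with
  | zero =>
    intro ys cur h
    have : ys = [] := List.eq_nil_of_length_eq_zero (by omega)
    subst this; simp [loopA, rleTop, procB]
  | succ n ih =>
    intro ys cur hlen
    cases ys with
    | nil => simp [loopA, rleTop, procB]
    | cons y ys' =>
      set k := (ys'.takeWhile (· == y)).length with hk
      set rest := ys'.dropWhile (· == y) with hrest
      have htw : ys'.takeWhile (· == y) = List.replicate k y := by
        apply List.eq_replicate_of_mem
        intro b hb
        have := List.mem_takeWhile_imp hb
        simpa using this.symm
      have hsplit : ys' = List.replicate k y ++ rest := by
        rw [← htw, hrest, List.takeWhile_append_dropWhile]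
      have hhd : rest.head? ≠ some y := by
        intro h
        cases hr : rest with
        | nil => rw [hr] at h; simp at h
        | cons z zs =>
          rw [hr] at h; simp at h
          have := List.head?_dropWhile_not (· == y) ys'
          rw [← hrest, hr] at this
          simp at this
          exact this h
      have hrl : rest.length ≤ n := by
        have h1 : rest.length ≤ ys'.length := by
          rw [hrest]; exact List.length_dropWhile_le _ _
        simp at hlen; omega
      have hys : y :: ys' = List.replicate (k+1) y ++ rest := by
        rw [List.replicate_succ, List.cons_append, hsplit]
      have hrle : rleTop (y :: ys') = (y, (1 : Int) + k) :: rleTop rest := by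
        show flushed (ys'.foldl rleStep ([], y, 1)) = _
        rw [hsplit]
        exact rle_run k 1 rest y (by omega) hhd
      by_cases hyc : y = cur
      · rw [hrle, hys, hyc, loopA_same]
        have hn : ((1 : Int) + (k : Nat)).toNat = k + 1 := by omega
        simp only [procB, hn]
        rw [ih rest cur hrl]
        simp
      · have hfor : loopA hd hu (y :: ys') cur 0 none =
            loopA hd hu (y :: ys') cur 0 (some y) := by
          rw [loopA_forget hd hu (y :: ys') cur 0 (some y) (by intro _ _ _; rfl)]
        rw [hfor, hrle, hys, loopA_diff hd hu (k+1) 0 rest cur y hyc hhd]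
        have hvne : ¬ (y = cur) := hyc
        simp only [procB, if_neg hvne]
        have e1 : (min ((1:Int) + k) (max (thr hd hu cur y - 1) 0)).toNat =
            min (k+1) (thr hd hu cur y - 1 - 0).toNat := by omega
        have e2 : ((1:Int) + k - min ((1:Int) + k) (max (thr hd hu cur y - 1) 0)).toNat =
            (k+1) - min (k+1) (thr hd hu cur y - 1 - 0).toNat := by omega
        have e3 : (0 < (1:Int) + k - min ((1:Int) + k) (max (thr hd hu cur y - 1) 0)) ↔
            ((thr hd hu cur y - 1 - 0).toNat < k + 1) := by omega
        rw [e1, e2, ih rest y hrl, ih rest cur hrl]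
        split_ifs with h1 h2 <;> first | rfl | omega

-- ===== VERDICT (by name: the statement is the Claim_ definition above) =====
theorem apply_hysteresis_spec : Claim_equal_apply_hysteresis := by
  intro raw_labels h_down h_up _
  unfold Spec_apply_hysteresis
  cases raw_labels with
  | nil => rfl
  | cons x0 rest =>
    show (((PySem.List.pyRange 1 ((x0 :: rest).length : Int) 1).foldl
      (fun st i => stepA h_down h_up st (PySem.List.pyGetD (x0 :: rest) i ""))
      ([x0], x0, 0, none)).1 : List String) = _
    rw [PySem.List.foldl_pyRange_pyGetD' (x0 :: rest) "" (stepA h_down h_up)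
      ([x0], x0, (0 : Int), (none : Option String)) (by omega : (0:Int) ≤ 1)]
    simp only [Int.toNat_one, List.drop_one, List.tail_cons]
    rw [foldA_eq]
    show _ = ((flushed (rest.foldl rleStep ([], "", 0))).foldl
      (procStep h_down h_up) ([x0], x0)).1
    rw [foldProc_eq]
    have hrt : flushed (rest.foldl rleStep ([], "", 0)) = rleTop rest := by
      cases rest with
      | nil => simp [flushed, rleTop]
      | cons z zs =>
        simp only [List.foldl_cons, rleStep]
        rw [if_neg (by simp), if_neg (by simp)]
        rfl
    rw [hrt, main_eq h_down h_up rest.length rest x0 le_rfl]
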